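-- pv_equiv track=rewrite | github.com/dubsidiya/checkbrain | desh/ege2026kp/14solve/14-364.py | perevod
-- ===== SOURCE A (Python) =====
-- def perevod(s,c,x):
--     a = 0
--     for i in range(len(s)):
--         if s[i] != 'a':
--             a += int(s[i],36) * c**i
--         else:
--             a+= x * c**i
--     return a
-- ===== SOURCE B (Python) =====
-- def perevod(s, c, x):
--     # Horner's method over the string reversed: one multiply per digit,
--     # no recomputation of c**i.
--     a = 0
--     for ch in reversed(s):
--         a = a * c + (x if ch == 'a' else int(ch, 36))
--     return a
-- ===== Notes on version B (the rewrite author's own statement) =====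
-- stated objective: faster
-- what changed: Replaces the per-position recomputation of c**i with Horner's method over the reversed string (one multiply-add per character).
import Mathlib
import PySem

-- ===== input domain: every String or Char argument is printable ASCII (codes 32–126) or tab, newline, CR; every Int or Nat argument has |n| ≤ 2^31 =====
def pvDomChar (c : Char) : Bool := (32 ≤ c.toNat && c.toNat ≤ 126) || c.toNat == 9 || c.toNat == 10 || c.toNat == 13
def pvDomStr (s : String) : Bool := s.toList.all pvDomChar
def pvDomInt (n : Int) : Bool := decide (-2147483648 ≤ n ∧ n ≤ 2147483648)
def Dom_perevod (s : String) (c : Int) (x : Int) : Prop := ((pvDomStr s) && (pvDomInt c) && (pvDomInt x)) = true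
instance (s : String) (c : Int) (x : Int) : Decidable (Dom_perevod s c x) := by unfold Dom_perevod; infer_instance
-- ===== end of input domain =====

-- B replaces the per-position recomputation of c**i with Horner's method over the
-- reversed string (one multiply-add per character): objective = faster.

-- ===== PORT A =====
-- int(ch, 36) for a single character ch; exact on the base-36 digit characters
-- admitted by Pre_ (Python raises ValueError otherwise — excluded by Pre_).
def pvDig36 (ch : Char) : Int := (PySem.Int.ofCharsBase? [ch] 36).getD 0

-- for i in range(len(s)): read s[i] with its index i, accumulate into a
def perevod (s : String) (c : Int) (x : Int) : Int :=
  (s.toList.zipIdx).foldl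
    (fun a p => if p.1 ≠ 'a' then a + pvDig36 p.1 * c ^ p.2 else a + x * c ^ p.2) 0

-- ===== PORT B =====
-- for ch in reversed(s): a = a*c + digit
def perevod_alt (s : String) (c : Int) (x : Int) : Int :=
  s.toList.reverse.foldl (fun a ch => a * c + (if ch = 'a' then x else pvDig36 ch)) 0

-- ===== PRECONDITION & SPEC =====
-- Pre_ excludes exactly the strings containing a character that is not a base-36
-- digit (not ASCII alphanumeric): there Python A raises ValueError in int(s[i],36).
def Pre_perevod (s : String) (c : Int) (x : Int) : Prop :=
  s.toList.all (fun ch => ch.isDigit || ch.isAlpha) = true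
instance (s : String) (c : Int) (x : Int) : Decidable (Pre_perevod s c x) := by
  unfold Pre_perevod; infer_instance

def pvWitness_perevod : String × Int × Int := ("1a2", 3, 5)

def Spec_perevod (s : String) (c : Int) (x : Int) (out : Int) : Prop := out = perevod_alt s c x
instance (s : String) (c : Int) (x : Int) (out : Int) : Decidable (Spec_perevod s c x out) := by unfold Spec_perevod; infer_instance

-- ===== CLAIM (what is proved, stated in full; the proofs are below) =====
def Claim_equal_perevod : Prop := ∀ (s : String) (c : Int) (x : Int), Dom_perevod s c x → Pre_perevod s c x → Spec_perevod s c x (perevod s c x)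

-- ===== LEMMAS AND PROOFS =====

-- the common value: Σ d_i · c^i over the digits, recursively
def pvVal (c : Int) (x : Int) : List Char → Int
  | [] => 0
  | ch :: t => (if ch = 'a' then x else pvDig36 ch) + c * pvVal c x t

theorem perevod_foldl_eq (c x : Int) (l : List Char) : ∀ (n : Nat) (a : Int),
    List.foldl
      (fun a p => if p.1 ≠ 'a' then a + pvDig36 p.1 * c ^ p.2 else a + x * c ^ p.2) a (l.zipIdx n)
    = a + c ^ n * pvVal c x l := by
  induction l with
  | nil => intro n a; simp [pvVal]
  | cons ch t ih =>
    intro n a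
    simp only [List.zipIdx_cons, List.foldl_cons, pvVal, ih (n + 1)]
    by_cases h : ch = 'a' <;> simp [h, pow_succ] <;> ring

theorem perevod_alt_foldl_eq (c x : Int) (l : List Char) : ∀ (a : Int),
    l.reverse.foldl (fun a ch => a * c + (if ch = 'a' then x else pvDig36 ch)) a
    = a * c ^ l.length + pvVal c x l := by
  induction l with
  | nil => intro a; simp [pvVal]
  | cons ch t ih =>
    intro a
    simp only [List.reverse_cons, List.foldl_append, List.foldl_cons, List.foldl_nil,
      ih, pvVal, List.length_cons, pow_succ]
    ring

-- ===== VERDICT (by name: the statement is the Claim_ definition above) =====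
theorem perevod_spec : Claim_equal_perevod := by
  intro s c x _ _
  unfold Spec_perevod perevod perevod_alt
  rw [perevod_foldl_eq, perevod_alt_foldl_eq]
  simp
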